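-- pv_equiv track=rewrite | github.com/stodd1031/CompressionResearch | not useful/varWithRep.py | getTopDiff
-- ===== SOURCE A (Python) =====
-- mod = 256
--
-- def getTopDiff(arr):
--     newArr = []
--     for index in range(0, len(arr)-1):
--         diff = arr[index+1] - arr[index]
--         if (diff < 0):
--             diff = mod + diff
--         newArr.append(diff)
--     if (len(arr) == 2):
--         return newArr[0]
--     else:
--         return getTopDiff(newArr)
-- ===== SOURCE B (Python) =====
-- def getTopDiff(arr):
--     a = list(arr)
--     for m in range(len(a) - 1, 0, -1):
--         for i in range(m):
--             d = a[i + 1] - a[i]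
--             a[i] = 256 + d if d < 0 else d
--     return a[0]
-- ===== Notes on version B (the rewrite author's own statement) =====
-- stated objective: alternative
-- what changed: Replaces A's recursion, which allocates a fresh difference list per level, with a single in-place array updated by triangular index loops (outer length countdown, inner left-to-right pass); same O(n^2) arithmetic, no per-level allocation or recursion.
import Mathlib
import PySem

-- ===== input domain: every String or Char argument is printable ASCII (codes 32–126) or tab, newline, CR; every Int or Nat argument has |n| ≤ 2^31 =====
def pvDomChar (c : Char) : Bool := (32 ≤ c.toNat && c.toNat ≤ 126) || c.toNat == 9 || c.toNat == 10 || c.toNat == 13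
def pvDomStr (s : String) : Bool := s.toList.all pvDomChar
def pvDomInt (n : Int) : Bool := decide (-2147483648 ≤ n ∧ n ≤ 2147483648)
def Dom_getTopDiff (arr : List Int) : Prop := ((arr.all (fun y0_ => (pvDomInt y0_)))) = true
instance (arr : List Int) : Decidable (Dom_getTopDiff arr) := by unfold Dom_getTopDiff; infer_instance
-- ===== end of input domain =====

-- B replaces A's recursion (a fresh difference list per level) by one in-place array
-- updated over triangular index loops; equivalence is about the return value only
-- (neither program mutates its argument: B copies it first).

-- ===== PORT A =====
-- Python A recurses forever on lists of length < 2 (RecursionError); the port uses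
-- fuel = arr.length, which is exhausted only outside Pre_getTopDiff (length ≥ 2).
-- pyGetD with default 0 is exact here: every index taken is in range.
def getTopDiffFuel : Nat → List Int → Int
  | 0, _ => 0
  | fuel + 1, arr =>
    let newArr := (PySem.List.pyRange 0 ((arr.length : Int) - 1) 1).foldl
      (fun acc index =>
        let diff := PySem.List.pyGetD arr (index + 1) 0 - PySem.List.pyGetD arr index 0
        let diff := if diff < 0 then 256 + diff else diff
        acc ++ [diff]) []
    if arr.length = 2 then PySem.List.pyGetD newArr 0 0
    else getTopDiffFuel fuel newArr

def getTopDiff (arr : List Int) : Int := getTopDiffFuel arr.length arr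

-- ===== PORT B =====
-- pySetD / pyGetD are exact here: every index reached is nonnegative and in range.
def getTopDiff_alt (arr : List Int) : Int :=
  let a := (PySem.List.pyRange ((arr.length : Int) - 1) 0 (-1)).foldl
    (fun a m =>
      (PySem.List.pyRange 0 m 1).foldl
        (fun a i =>
          let d := PySem.List.pyGetD a (i + 1) 0 - PySem.List.pyGetD a i 0
          PySem.List.pySetD a i (if d < 0 then 256 + d else d)) a) arr
  PySem.List.pyGetD a 0 0

-- ===== PRECONDITION & SPEC =====
-- Python A recurses forever (RecursionError) on lists of length 0 or 1, so those
-- inputs are excluded; every input on which A returns satisfies length ≥ 2.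
def Pre_getTopDiff (arr : List Int) : Prop := 2 ≤ arr.length
instance (arr : List Int) : Decidable (Pre_getTopDiff arr) := by unfold Pre_getTopDiff; infer_instance

def pvWitness_getTopDiff : List Int := [7, 300, -5]

def Spec_getTopDiff (arr : List Int) (out : Int) : Prop := out = getTopDiff_alt arr
instance (arr : List Int) (out : Int) : Decidable (Spec_getTopDiff arr out) := by unfold Spec_getTopDiff; infer_instance

-- ===== CLAIM (what is proved, stated in full; the proofs are below) =====
def Claim_equal_getTopDiff : Prop := ∀ (arr : List Int), Dom_getTopDiff arr → Pre_getTopDiff arr → Spec_getTopDiff arr (getTopDiff arr)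

-- ===== LEMMAS AND PROOFS =====

-- the one-level difference operator both programs implement
def mstep (l : List Int) : List Int :=
  List.zipWith (fun x y => if y - x < 0 then 256 + (y - x) else y - x) l l.tail

theorem length_mstep (l : List Int) : (mstep l).length = l.length - 1 := by simp [mstep]

theorem getElem_mstep (l : List Int) (i : Nat) (hi : i + 1 < l.length) :
    (mstep l)[i]'(by simp [length_mstep]; omega) =
      if l[i+1] - l[i] < 0 then 256 + (l[i+1] - l[i]) else l[i+1] - l[i] := by
  simp only [mstep, List.getElem_zipWith, List.getElem_tail]

-- A's per-level loop builds exactly mstep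
theorem buildA (l : List Int) :
    (PySem.List.pyRange 0 ((l.length : Int) - 1) 1).foldl
      (fun acc index =>
        let diff := PySem.List.pyGetD l (index + 1) 0 - PySem.List.pyGetD l index 0
        let diff := if diff < 0 then 256 + diff else diff
        acc ++ [diff]) [] = mstep l := by
  rw [PySem.List.foldl_append_singleton_eq_map, PySem.List.pyRange_one]
  simp only [List.map_map, List.nil_append]
  apply List.ext_getElem
  · simp [mstep]
  · intro i h1 h2
    simp only [List.getElem_map, List.getElem_range, Function.comp]
    have hlen : i < l.length - 1 := by simp at h1; omega
    have hc : (0 : Int) + (i : Int) + 1 = ((i + 1 : Nat) : Int) := by push_cast; ring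
    have hc0 : (0 : Int) + (i : Int) = ((i : Nat) : Int) := by norm_num
    rw [hc, hc0, PySem.List.pyGetD_natCast, PySem.List.pyGetD_natCast]
    rw [List.getD_eq_getElem l 0 (by omega), List.getD_eq_getElem l 0 (by omega)]
    simp only [mstep, List.getElem_zipWith, List.getElem_tail]

-- A's recursion computes the head of the (length-1)-fold iterate of mstep
theorem fuelA (fuel : Nat) : ∀ (l : List Int), 2 ≤ l.length → l.length ≤ fuel + 1 →
    getTopDiffFuel fuel l = PySem.List.pyGetD (mstep^[l.length - 1] l) 0 0 := by
  induction fuel with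
  | zero => intro l h1 h2; omega
  | succ f ih =>
    intro l h1 h2
    rw [getTopDiffFuel]
    simp only [buildA l]
    by_cases hl : l.length = 2
    · rw [if_pos hl, hl]
      rfl
    · rw [if_neg hl]
      have hlen : (mstep l).length = l.length - 1 := length_mstep l
      rw [ih (mstep l) (by omega) (by omega), hlen]
      have : mstep^[l.length - 1 - 1] (mstep l) = mstep^[l.length - 1] l := by
        rw [← Function.iterate_succ_apply]
        congr 1
        omega
      rw [this]

-- B's inner pass writes (mstep l).take m over the first m cells, left to right
theorem innerB (cnt : Nat) : ∀ (j : Nat) (l : List Int), j + cnt ≤ l.length - 1 →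
    (PySem.List.pyRange (j : Int) ((j + cnt : Nat) : Int) 1).foldl
      (fun a i =>
        let d := PySem.List.pyGetD a (i + 1) 0 - PySem.List.pyGetD a i 0
        PySem.List.pySetD a i (if d < 0 then 256 + d else d))
      ((mstep l).take j ++ l.drop j)
    = (mstep l).take (j + cnt) ++ l.drop (j + cnt) := by
  induction cnt with
  | zero =>
    intro j l h
    rw [PySem.List.pyRange_one_eq_nil (by push_cast; omega)]
    simp
  | succ c ih =>
    intro j l h
    rw [PySem.List.pyRange_one_cons (by push_cast; omega)]
    rw [List.foldl_cons]
    have hjlt : j + 1 < l.length := by omega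
    have hjm : j < (mstep l).length := by rw [length_mstep]; omega
    have htklen : ((mstep l).take j).length = j := by
      rw [List.length_take]; omega
    -- the two reads see untouched cells of l
    have hread0 : PySem.List.pyGetD ((mstep l).take j ++ l.drop j) (j : Int) 0 = l[j]'(by omega) := by
      rw [PySem.List.pyGetD_natCast]
      rw [List.getD_eq_getElem _ 0 (by simp [htklen]; omega)]
      rw [List.getElem_append_right (by omega)]
      simp [htklen]
    have hread1 : PySem.List.pyGetD ((mstep l).take j ++ l.drop j) ((j : Int) + 1) 0 = l[j+1]'hjlt := by
      have : (j : Int) + 1 = ((j + 1 : Nat) : Int) := by push_cast; ring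
      rw [this, PySem.List.pyGetD_natCast]
      rw [List.getD_eq_getElem _ 0 (by simp [htklen]; omega)]
      rw [List.getElem_append_right (by omega)]
      simp [htklen]
    simp only [hread0, hread1]
    -- the write puts (mstep l)[j] into cell j
    have hwrite : PySem.List.pySetD ((mstep l).take j ++ l.drop j) (j : Int)
        (if l[j+1]'hjlt - l[j]'(by omega) < 0 then 256 + (l[j+1]'hjlt - l[j]'(by omega))
          else l[j+1]'hjlt - l[j]'(by omega))
        = (mstep l).take (j+1) ++ l.drop (j+1) := by
      rw [PySem.List.pySetD_natCast]
      rw [List.set_append]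
      rw [if_neg (by omega)]
      rw [htklen, Nat.sub_self]
      rw [List.drop_eq_getElem_cons (by omega)]
      rw [List.set_cons_zero]
      rw [List.take_add_one]
      rw [List.getElem?_eq_getElem hjm]
      rw [getElem_mstep l j hjlt]
      simp
    rw [hwrite]
    have := ih (j + 1) l (by omega)
    have hc : ((j : Int) + 1) = ((j + 1 : Nat) : Int) := by push_cast; ring
    have hc2 : ((j + (c+1) : Nat) : Int) = (((j+1) + c : Nat) : Int) := by push_cast; ring
    rw [hc, hc2, this]
    congr 2 <;> omega

theorem take_mstep_append (l t : List Int) (h : 1 ≤ l.length) :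
    (mstep (l ++ t)).take (l.length - 1) = mstep l := by
  apply List.ext_getElem
  · simp [length_mstep]; omega
  · intro i h1 h2
    have hi : i + 1 < l.length := by
      simp [length_mstep] at h1; omega
    rw [List.getElem_take]
    rw [getElem_mstep (l ++ t) i (by simp; omega), getElem_mstep l i hi]
    rw [List.getElem_append_left (by omega), List.getElem_append_left (by omega)]

-- B's outer countdown iterates mstep on the live prefix, junk accumulating behind it
theorem outerB (k : Nat) : ∀ (l tail : List Int), l.length = k + 1 →
    PySem.List.pyGetD
      ((PySem.List.pyRange (k : Int) 0 (-1)).foldl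
        (fun a m =>
          (PySem.List.pyRange 0 m 1).foldl
            (fun a i =>
              let d := PySem.List.pyGetD a (i + 1) 0 - PySem.List.pyGetD a i 0
              PySem.List.pySetD a i (if d < 0 then 256 + d else d)) a) (l ++ tail)) 0 0
    = PySem.List.pyGetD (mstep^[k] l) 0 0 := by
  induction k with
  | zero =>
    intro l tail hl
    rw [PySem.List.pyRange_neg_one_eq_nil (by omega)]
    match l, hl with
    | [x], _ => simp [PySem.List.pyGetD]
  | succ k ih =>
    intro l tail hl
    rw [PySem.List.pyRange_neg_one_cons (by push_cast; omega)]
    rw [List.foldl_cons]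
    -- one inner pass over the whole array
    have hinner := innerB (k + 1) 0 (l ++ tail) (by simp; omega)
    simp only [Nat.zero_add, Nat.cast_zero, List.take_zero, List.nil_append, List.drop_zero] at hinner
    rw [hinner]
    have htake : (mstep (l ++ tail)).take (k + 1) = mstep l := by
      have := take_mstep_append l tail (by omega)
      rwa [hl, Nat.add_sub_cancel] at this
    rw [htake]
    have hc2 : (((k + 1 : Nat)) : Int) - 1 = (k : Int) := by push_cast; ring
    rw [hc2]
    rw [ih (mstep l) ((l ++ tail).drop (k + 1)) (by rw [length_mstep]; omega)]
    rw [← Function.iterate_succ_apply]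

-- ===== VERDICT (by name: the statement is the Claim_ definition above) =====
theorem getTopDiff_spec : Claim_equal_getTopDiff := by
  intro arr _ hpre
  unfold Spec_getTopDiff
  unfold Pre_getTopDiff at hpre
  have hA : getTopDiff arr = PySem.List.pyGetD (mstep^[arr.length - 1] arr) 0 0 := by
    unfold getTopDiff
    exact fuelA arr.length arr hpre (by omega)
  have hB : getTopDiff_alt arr = PySem.List.pyGetD (mstep^[arr.length - 1] arr) 0 0 := by
    unfold getTopDiff_alt
    have hc : ((arr.length : Int) - 1) = ((arr.length - 1 : Nat) : Int) := by omega
    rw [hc]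
    have := outerB (arr.length - 1) arr [] (by omega)
    simpa using this
  rw [hA, hB]
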